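-- pv_equiv track=rewrite | github.com/KenSodium/HealthNutritionTracker | nutrition/services/quantity_parser.py | pick_default_unit
-- ===== SOURCE A (Python) =====
-- def pick_default_unit(portions) -> str | None:
--     """
--     Choose the most human unit if available.
--     Safe if portions is None, a string, or any non-list.
--     """
--     priority = ["cracker", "slice", "cup", "tbsp", "tsp", "whole", "piece"]
--
--     if not isinstance(portions, (list, tuple)):
--         portions = []
--     clean = [p for p in portions if isinstance(p, dict)]
--
--     units = {(p.get("unit") or "").lower() for p in clean if p.get("unit")}
--     for u in priority:
--         if u in units:
--             return u
--
--     for p in clean: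
--         u = (p.get("unit") or "").lower()
--         if u:
--             return u
--     return None
-- ===== SOURCE B (Python) =====
-- def pick_default_unit(portions):
--     """Single argmin pass: rank each unit by its priority index (len(priority) if
--     not a priority unit); keep the first unit with the strictly smallest rank."""
--     priority = ["cracker", "slice", "cup", "tbsp", "tsp", "whole", "piece"]
--     if not isinstance(portions, (list, tuple)):
--         portions = []
--     units = [(p.get("unit") or "").lower()
--              for p in portions
--              if isinstance(p, dict) and p.get("unit")]
--
--     def rank(u):
--         return priority.index(u) if u in priority else len(priority)
--
--     best = None
--     for u in units:
--         if best is None or rank(u) < rank(best):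
--             best = u
--     return best
-- ===== Notes on version B (the rewrite author's own statement) =====
-- stated objective: simpler
-- what changed: Replaces A's three phases (build a set of units, scan the priority list for a member, then rescan the portions for a fallback) by a single argmin pass over the unit list that keeps the first unit with the smallest priority rank (rank = index in the priority list, or its length for non-priority units).
import Mathlib
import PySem

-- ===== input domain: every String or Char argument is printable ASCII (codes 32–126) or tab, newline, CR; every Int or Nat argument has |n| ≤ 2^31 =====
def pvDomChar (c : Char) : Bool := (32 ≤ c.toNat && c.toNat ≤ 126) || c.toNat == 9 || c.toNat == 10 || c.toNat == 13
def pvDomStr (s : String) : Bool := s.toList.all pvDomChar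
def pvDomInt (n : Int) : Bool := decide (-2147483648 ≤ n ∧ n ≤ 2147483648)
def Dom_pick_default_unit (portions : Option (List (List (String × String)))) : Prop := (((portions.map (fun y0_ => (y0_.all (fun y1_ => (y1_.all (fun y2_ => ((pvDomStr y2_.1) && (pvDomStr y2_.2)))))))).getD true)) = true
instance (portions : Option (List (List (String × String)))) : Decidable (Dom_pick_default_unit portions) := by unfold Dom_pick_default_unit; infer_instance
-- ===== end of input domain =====

-- B replaces A's set + priority scan + second fallback scan by a single argmin pass
-- over the unit list keyed by priority rank (objective: simpler); A is total, no Pre_.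

-- The priority list, written identically in both Pythons.
def pvPriority : List String := ["cracker", "slice", "cup", "tbsp", "tsp", "whole", "piece"]

-- (p.get("unit") or ""): dict lookup = first matching key of the association list, "" if absent.
def pvUnitStr (p : List (String × String)) : String :=
  ((p.find? (fun kv => kv.1 == "unit")).map Prod.snd).getD ""

-- the comprehension both Pythons contain: [(p.get("unit") or "").lower() for p in clean if p.get("unit")]
-- (truthiness of p.get("unit"): false exactly when missing (→ "") or equal to "")
def pvUnitsOf (clean : List (List (String × String))) : List String :=
  (clean.filter (fun p => decide (pvUnitStr p ≠ ""))).map (fun p => PySem.Str.lower (pvUnitStr p))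

-- ===== PORT A =====
-- A's second loop: for p in clean: u = (p.get("unit") or "").lower(); if u: return u
def pvFallbackLoop : List (List (String × String)) → Option String
  | [] => none
  | p :: rest =>
    let u := PySem.Str.lower (pvUnitStr p)
    if u ≠ "" then some u else pvFallbackLoop rest

def pick_default_unit (portions : Option (List (List (String × String)))) : Option String :=
  -- isinstance guards drop nothing here: every element is a dict under the type convention
  let clean := portions.getD []
  let units : PySem.Set String := PySem.Set.ofList (pvUnitsOf clean)
  match pvPriority.find? (fun u => PySem.Set.contains units u) with  -- for u in priority: if u in units: return u
  | some u => some u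
  | none => pvFallbackLoop clean

-- ===== PORT B =====
-- rank(u) = priority.index(u) if u in priority else len(priority); List.idxOf computes exactly that
def pvRank (u : String) : Nat := pvPriority.idxOf u

def pick_default_unit_alt (portions : Option (List (List (String × String)))) : Option String :=
  let clean := portions.getD []
  let units := pvUnitsOf clean
  units.foldl (fun best u =>
    match best with
    | none => some u
    | some b => if pvRank u < pvRank b then some u else some b) none

-- ===== PRECONDITION & SPEC =====
def Spec_pick_default_unit (portions : Option (List (List (String × String)))) (out : Option String) : Prop := out = pick_default_unit_alt portions
instance (portions : Option (List (List (String × String)))) (out : Option String) : Decidable (Spec_pick_default_unit portions out) := by unfold Spec_pick_default_unit; infer_instance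

-- ===== CLAIM (what is proved, stated in full; the proofs are below) =====
def Claim_equal_pick_default_unit : Prop := ∀ (portions : Option (List (List (String × String)))), Dom_pick_default_unit portions → Spec_pick_default_unit portions (pick_default_unit portions)

-- ===== LEMMAS AND PROOFS =====

-- left-biased "min by rank" on optional candidates
def pvMerge (rk : String → Nat) : Option String → Option String → Option String
  | b, none => b
  | none, some v => some v
  | some b, some v => if rk v < rk b then some v else some b

-- what A computes on the unit list, for an arbitrary priority list pr
def pvFind (pr : List String) (us : List String) : Option String :=
  match pr.find? (fun u => decide (u ∈ us)) with
  | some v => some v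
  | none => us.head?

theorem pvMerge_none_left (rk : String → Nat) (x : Option String) : pvMerge rk none x = x := by
  cases x <;> rfl

theorem pvMerge_none_right (rk : String → Nat) (x : Option String) : pvMerge rk x none = x := by
  cases x <;> rfl

theorem pvMerge_assoc (rk : String → Nat) (a b c : Option String) :
    pvMerge rk (pvMerge rk a b) c = pvMerge rk a (pvMerge rk b c) := by
  rcases a with _ | a <;> rcases b with _ | b <;> rcases c with _ | c <;>
    try simp only [pvMerge_none_left, pvMerge_none_right]
  simp only [pvMerge]
  by_cases h1 : rk b < rk a <;> by_cases h2 : rk c < rk b <;>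
    simp [h1, h2] <;> first | rfl | omega

theorem pvFoldl_merge (rk : String → Nat) (us : List String) (b : Option String) :
    us.foldl (fun x u => pvMerge rk x (some u)) b
      = pvMerge rk b (us.foldl (fun x u => pvMerge rk x (some u)) none) := by
  induction us generalizing b with
  | nil => rcases b with _ | b <;> rfl
  | cons u t ih =>
    simp only [List.foldl_cons]
    rw [ih (pvMerge rk b (some u)), ih (pvMerge rk none (some u)), pvMerge_none_left,
      ← pvMerge_assoc]

theorem pvFind_mem (pr us : List String) (v : String) (h : pvFind pr us = some v) : v ∈ us := by
  unfold pvFind at h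
  cases hf : pr.find? (fun u => decide (u ∈ us)) with
  | some w =>
    rw [hf] at h
    have := List.find?_some hf
    simp at this
    cases h; exact this
  | none =>
    rw [hf] at h
    exact List.mem_of_mem_head? h

theorem pvFind_cons (pr : List String) (u : String) (t : List String) :
    pvFind pr (u :: t) = pvMerge (fun x => pr.idxOf x) (some u) (pvFind pr t) := by
  induction pr with
  | nil =>
    cases t with
    | nil => rfl
    | cons w t' => simp [pvFind, pvMerge, List.idxOf]
  | cons p pr' ih =>
    by_cases hp : p ∈ u :: t
    · -- find? over p :: pr' hits p immediately on the left side
      have hL : pvFind (p :: pr') (u :: t) = some p := by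
        unfold pvFind; rw [List.find?_cons, decide_eq_true hp]
      by_cases hpt : p ∈ t
      · have hR : pvFind (p :: pr') t = some p := by
          simp [pvFind, hpt]
        rw [hL, hR]
        by_cases hpu : p = u
        · subst hpu
          simp [pvMerge, List.idxOf_cons_self]
        · have h1 : (p :: pr').idxOf p = 0 := List.idxOf_cons_self
          have h2 : (p :: pr').idxOf u = ((pr').idxOf u).succ :=
            List.idxOf_cons_ne pr' (fun h => hpu h)
          simp [pvMerge, h1, h2]
      · have hpu : p = u := by
          rcases List.mem_cons.mp hp with h | h
          · exact h
          · exact absurd h hpt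
        subst hpu
        have h0 : (p :: pr').idxOf p = 0 := List.idxOf_cons_self
        have hR : pvFind (p :: pr') t = pvFind pr' t := by
          unfold pvFind; rw [List.find?_cons, decide_eq_false hpt]
        rw [hL, hR]
        cases hX : pvFind pr' t with
        | none => simp [pvMerge]
        | some v => simp [pvMerge, h0]
    · -- p matches neither side; both reduce to pr' and ranks shift uniformly by one
      have hpt : p ∉ t := fun h => hp (List.mem_cons_of_mem _ h)
      have hL : pvFind (p :: pr') (u :: t) = pvFind pr' (u :: t) := by
        unfold pvFind; rw [List.find?_cons, decide_eq_false hp]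
      have hR : pvFind (p :: pr') t = pvFind pr' t := by
        unfold pvFind; rw [List.find?_cons, decide_eq_false hpt]
      rw [hL, hR, ih]
      have hu : p ≠ u := fun h => hp (h ▸ List.mem_cons_self)
      cases hX : pvFind pr' t with
      | none => simp [pvMerge]
      | some v =>
        have hv : v ∈ t := pvFind_mem pr' t v hX
        have hvp : p ≠ v := fun h => hpt (h ▸ hv)
        have e1 : (p :: pr').idxOf u = ((pr').idxOf u).succ := List.idxOf_cons_ne pr' hu
        have e2 : (p :: pr').idxOf v = ((pr').idxOf v).succ := List.idxOf_cons_ne pr' hvp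
        simp only [pvMerge, e1, e2]
        split_ifs with h1 h2 h2 <;> first | rfl | omega

theorem pvFind_eq_foldl (us : List String) :
    pvFind pvPriority us = us.foldl (fun x u => pvMerge pvRank x (some u)) none := by
  induction us with
  | nil =>
    unfold pvFind
    rw [List.find?_eq_none.mpr (by intro x _; simp)]
    rfl
  | cons u t ih =>
    rw [pvFind_cons, ih]
    show _ = List.foldl (fun x u => pvMerge pvRank x (some u)) (pvMerge pvRank none (some u)) t
    rw [pvFoldl_merge pvRank t (pvMerge pvRank none (some u)), pvMerge_none_left]
    rfl

theorem pvFallback_eq_head (clean : List (List (String × String))) :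
    pvFallbackLoop clean = (pvUnitsOf clean).head? := by
  induction clean with
  | nil => rfl
  | cons p t ih =>
    have hlow : (PySem.Str.lower (pvUnitStr p) = "") ↔ pvUnitStr p = "" := by
      rw [← String.toList_eq_nil_iff, ← String.toList_eq_nil_iff (b := pvUnitStr p),
        PySem.Str.toList_lower]
      simp [PySem.Chars.lower]
    by_cases h : pvUnitStr p = ""
    · have : PySem.Str.lower (pvUnitStr p) = "" := hlow.mpr h
      simp [pvFallbackLoop, pvUnitsOf, h] at ih ⊢
      exact ih
    · have hne : PySem.Str.lower (pvUnitStr p) ≠ "" := fun hc => h (hlow.mp hc)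
      simp [pvFallbackLoop, pvUnitsOf, hne, h]

theorem pvContains_eq (us : List String) :
    (fun u => PySem.Set.contains (PySem.Set.ofList us) u) = (fun u => decide (u ∈ us)) := by
  funext x
  by_cases h : x ∈ us <;> simp [h]

theorem pvStep_eq :
    (fun (best : Option String) (u : String) =>
      match best with
      | none => some u
      | some b => if pvRank u < pvRank b then some u else some b)
    = (fun x u => pvMerge pvRank x (some u)) := by
  funext b u
  cases b <;> rfl

theorem pvMain (clean : List (List (String × String))) :
    (match pvPriority.find? (fun u => PySem.Set.contains (PySem.Set.ofList (pvUnitsOf clean)) u) with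
      | some u => some u
      | none => pvFallbackLoop clean)
    = (pvUnitsOf clean).foldl (fun best u =>
        match best with
        | none => some u
        | some b => if pvRank u < pvRank b then some u else some b) none := by
  rw [pvContains_eq, pvStep_eq, pvFallback_eq_head, ← pvFind_eq_foldl]
  rfl

-- ===== VERDICT (by name: the statement is the Claim_ definition above) =====
theorem pick_default_unit_spec : Claim_equal_pick_default_unit := by
  intro portions _
  show pick_default_unit portions = pick_default_unit_alt portions
  exact pvMain (portions.getD [])
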